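-- pv_equiv track=rewrite | github.com/nicop111/dpoc | PS3/Solution/ProblemSet3_Sol8.py | cost_of_alignment
-- ===== SOURCE A (Python) =====
-- def mismatch_penalty(a, b):
--     """Return the mismatch penalty between a and b.
--
--     Each base substitution or amino acid substitution is assigned a
--     score. In general, matches are assigned negative costs, and
--     mismatches are assigned relatively higher costs.
--
--     Parameters
--     ----------
--     a : character
--         sequence element 1
--     b : chaaracter
--         sequence element 2
--
--     Returns
--     -------
--     int
--         similarity score
--     """
--     # TODO
--     return -3 if a == b else 3
--
-- def gap_penalty(k):
--     """Return the gap penalty for a gap of length k.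
--
--     The gap penalty assigns penalties for insertion or deletion.
--     We use a linear penalty for other possibilities see
--     https://en.wikipedia.org/wiki/Smith%E2%80%93Waterman_algorithm.
--
--     Parameters
--     ----------
--     k : int
--         gap length
--
--     Returns
--     -------
--     int
--         gap penalty
--     """
--     # TODO
--     return 2 * k
--
-- def cost_of_alignment(alignment):
--     """Return the cost of an alignment.
--
--     Parameters
--     ----------
--     alignment : List of tuples of characters
--         e.g. [('A','B'), ...]
--
--     Returns
--     -------
--     int
--         Cost of the alignment
--     """
--     cost = 0
--     i = 0
--     # Do not score leading gaps
--     if i < len(alignment):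
--         while alignment[i][0] == "-" or alignment[i][1] == "-":
--             i += 1
--             if i >= len(alignment):
--                 break
--     while i < len(alignment):
--         gap_length = 0
--         while alignment[i][0] == "-" or alignment[i][1] == "-":
--             gap_length += 1
--             i += 1
--             if i >= len(alignment):
--                 break
--         # Do not score trailing gaps
--         if i >= len(alignment):
--             break
--         if gap_length == 0:
--             cost += mismatch_penalty(ord(alignment[i][0]), ord(alignment[i][1]))
--             i += 1
--         else:
--             cost += gap_penalty(gap_length)
--     return cost
-- ===== SOURCE B (Python) =====
-- def mismatch_penalty(a, b):
--     return -3 if a == b else 3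
--
-- def gap_penalty(k):
--     return 2 * k
--
-- def cost_of_alignment(alignment):
--     # Trim leading/trailing gap columns, then: the linear gap penalty over runs
--     # equals 2 * (number of gap columns inside the trimmed window), plus the
--     # mismatch scores of all non-gap columns (all of which lie in the window).
--     gaps = [x == "-" or y == "-" for (x, y) in alignment]
--     if all(gaps):
--         return 0
--     l = gaps.index(False)
--     r = len(gaps) - 1 - gaps[::-1].index(False)
--     return 2 * sum(gaps[l:r + 1]) + sum(
--         mismatch_penalty(ord(x), ord(y))
--         for (x, y), g in zip(alignment, gaps) if not g)
-- ===== Notes on version B (the rewrite author's own statement) =====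
-- stated objective: simpler
-- what changed: B replaces A's fused nested-while machine (index pointer, run counter, mid-loop breaks) by a direct formula: find the first/last non-gap column, count gap columns in that window (linear gap penalty makes run-splitting unnecessary: sum of 2*run = 2*total gaps), and add the mismatch scores of all non-gap columns in one pass.
import Mathlib
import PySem

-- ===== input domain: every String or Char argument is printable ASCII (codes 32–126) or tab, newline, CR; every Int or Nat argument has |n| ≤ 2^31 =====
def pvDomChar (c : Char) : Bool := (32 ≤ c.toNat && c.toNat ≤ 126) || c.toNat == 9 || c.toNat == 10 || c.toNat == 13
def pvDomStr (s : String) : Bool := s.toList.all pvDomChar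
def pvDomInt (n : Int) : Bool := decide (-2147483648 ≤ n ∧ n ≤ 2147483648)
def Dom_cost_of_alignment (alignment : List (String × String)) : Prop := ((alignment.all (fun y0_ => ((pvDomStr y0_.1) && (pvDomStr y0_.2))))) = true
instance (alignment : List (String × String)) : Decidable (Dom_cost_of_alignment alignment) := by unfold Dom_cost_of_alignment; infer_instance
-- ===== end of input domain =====

-- B computes the same alignment cost by a direct formula (trim window + 2*gap-count + mismatch sum)
-- instead of A's fused nested while-loops; objective: simpler. Equivalence is proved on Pre_ (inputs
-- where Python's ord() does not raise).


-- shared module-level helpers of Source A / Source B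
def mismatch_penalty (a b : Int) : Int := if a == b then -3 else 3
def gap_penalty (k : Int) : Int := 2 * k
-- ord(s): exact for length-1 strings; Pre_ excludes the inputs where Python's ord raises
def pvOrd (s : String) : Int :=
  match s.toList with
  | [c] => (c.toNat : Int)
  | _ => 0

-- ===== PORT A =====
-- Loops are ported with the standard fuel pattern (fuel = list length bounds the iteration
-- count); with the fuel supplied below the guards never exhaust, so each is the Python loop.
-- leading-gap while loop: `while gap(alignment[i]): i += 1; if i >= len: break`
def pvSkipA (alignment : List (String × String)) (fuel i : Nat) : Nat :=
  match fuel with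
  | 0 => i
  | fuel + 1 =>
    if h : i < alignment.length then
      if alignment[i].1 == "-" || alignment[i].2 == "-" then pvSkipA alignment fuel (i + 1)
      else i
    else i

-- inner while loop: `while gap(alignment[i]): gap_length += 1; i += 1; if i >= len: break`
def pvGapRun (alignment : List (String × String)) (fuel : Nat) (gap_length : Int) (i : Nat) :
    Int × Nat :=
  match fuel with
  | 0 => (gap_length, i)
  | fuel + 1 =>
    if h : i < alignment.length then
      if alignment[i].1 == "-" || alignment[i].2 == "-" then
        pvGapRun alignment fuel (gap_length + 1) (i + 1)
      else (gap_length, i)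
    else (gap_length, i)

-- outer while loop of A
def pvOuterA (alignment : List (String × String)) (fuel : Nat) (i : Nat) (cost : Int) : Int :=
  match fuel with
  | 0 => cost
  | fuel + 1 =>
    if h : i < alignment.length then
      let r := pvGapRun alignment alignment.length 0 i
      if hj : r.2 < alignment.length then
        if r.1 == 0 then
          pvOuterA alignment fuel (r.2 + 1)
            (cost + mismatch_penalty (pvOrd alignment[r.2].1) (pvOrd alignment[r.2].2))
        else
          pvOuterA alignment fuel r.2 (cost + gap_penalty r.1)
      else cost
    else cost

def cost_of_alignment (alignment : List (String × String)) : Int :=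
  let i0 := if 0 < alignment.length then pvSkipA alignment alignment.length 0 else 0
  pvOuterA alignment alignment.length i0 0

-- ===== PORT B =====
def cost_of_alignment_alt (alignment : List (String × String)) : Int :=
  let gaps := alignment.map (fun p => p.1 == "-" || p.2 == "-")
  if gaps.all (fun g => g) then 0
  else
    -- gaps.index(False): present here since not all(gaps); getD 0 is unreachable
    let l : Int := ((PySem.List.index? gaps false).getD 0 : Nat)
    let r : Int := (gaps.length : Int) - 1 - ((PySem.List.index? gaps.reverse false).getD 0 : Nat)
    2 * ((PySem.List.slice gaps (some l) (some (r + 1))).count true : Int) +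
      (alignment.zip gaps).foldl
        (fun c pg => if pg.2 then c else c + mismatch_penalty (pvOrd pg.1.1) (pvOrd pg.1.2)) 0

-- ===== PRECONDITION & SPEC =====
-- Pre_ excludes exactly the inputs where Python raises (TypeError from ord() on a string of
-- length ≠ 1 in a column whose two entries both differ from "-"); both A and B raise there.
def Pre_cost_of_alignment (alignment : List (String × String)) : Prop :=
  (alignment.all (fun p =>
    p.1 == "-" || p.2 == "-" || (p.1.toList.length == 1 && p.2.toList.length == 1))) = true
instance (alignment : List (String × String)) : Decidable (Pre_cost_of_alignment alignment) := by
  unfold Pre_cost_of_alignment; infer_instance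

def pvWitness_cost_of_alignment : (List (String × String)) :=
  [("-", "A"), ("A", "B"), ("C", "C"), ("B", "-")]

def Spec_cost_of_alignment (alignment : List (String × String)) (out : Int) : Prop := out = cost_of_alignment_alt alignment
instance (alignment : List (String × String)) (out : Int) : Decidable (Spec_cost_of_alignment alignment out) := by unfold Spec_cost_of_alignment; infer_instance

-- ===== CLAIM (what is proved, stated in full; the proofs are below) =====
def Claim_equal_cost_of_alignment : Prop := ∀ (alignment : List (String × String)), Dom_cost_of_alignment alignment → Pre_cost_of_alignment alignment → Spec_cost_of_alignment alignment (cost_of_alignment alignment)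

-- ===== LEMMAS AND PROOFS =====
def pvGap (p : String × String) : Bool := p.1 == "-" || p.2 == "-"
def pvMM (p : String × String) : Int := mismatch_penalty (pvOrd p.1) (pvOrd p.2)
def pvW (p : String × String) : Int := if pvGap p then 2 else pvMM p

-- bridge spec: cost of a list after leading gaps were trimmed
def pvGo : List (String × String) → Int
  | [] => 0
  | p :: rest =>
      if pvGap p then (if rest.any (fun q => !pvGap q) then 2 + pvGo rest else 0)
      else pvMM p + pvGo rest

-- two list generalities not found in Mathlib
theorem pvDropWhile_eq_drop {α : Type} (l : List α) (p : α → Bool) :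
    l.dropWhile p = l.drop (l.takeWhile p).length := by
  induction l with
  | nil => rfl
  | cons a t ih => by_cases h : p a <;> simp [h, ih]

theorem pvTakeWhile_getElem {α : Type} (l : List α) (p : α → Bool)
    (h : (l.takeWhile p).length < l.length) : p (l[(l.takeWhile p).length]'h) = false := by
  induction l with
  | nil => simp at h
  | cons a t ih =>
      by_cases hp : p a
      · simp [hp] at h ⊢; exact ih (by omega)
      · simp [hp]

theorem pvSkipA_eq (alignment : List (String × String)) :
    ∀ (fuel i : Nat), alignment.length - i ≤ fuel →
      pvSkipA alignment fuel i = i + ((alignment.drop i).takeWhile pvGap).length := by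
  intro fuel
  induction fuel with
  | zero =>
      intro i hf
      rw [pvSkipA, List.drop_eq_nil_of_le (by omega)]; simp
  | succ fuel ih =>
      intro i hf
      rw [pvSkipA]
      by_cases h : i < alignment.length
      · rw [dif_pos h, List.drop_eq_getElem_cons h, List.takeWhile_cons]
        by_cases hgap : alignment[i].1 == "-" || alignment[i].2 == "-"
        · rw [if_pos hgap, ih (i + 1) (by omega)]
          have : pvGap alignment[i] = true := by simpa [pvGap] using hgap
          simp [this]; omega
        · rw [if_neg hgap]
          have : pvGap alignment[i] = false := by simpa [pvGap] using hgap
          simp [this]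
      · rw [dif_neg h, List.drop_eq_nil_of_le (by omega)]; simp

theorem pvGapRun_eq (alignment : List (String × String)) :
    ∀ (fuel : Nat) (g : Int) (i : Nat), alignment.length - i ≤ fuel →
      pvGapRun alignment fuel g i =
        (g + (((alignment.drop i).takeWhile pvGap).length : Int),
         i + ((alignment.drop i).takeWhile pvGap).length) := by
  intro fuel
  induction fuel with
  | zero =>
      intro g i hf
      rw [pvGapRun, List.drop_eq_nil_of_le (by omega)]; simp
  | succ fuel ih =>
      intro g i hf
      rw [pvGapRun]
      by_cases h : i < alignment.length
      · rw [dif_pos h, List.drop_eq_getElem_cons h, List.takeWhile_cons]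
        by_cases hgap : alignment[i].1 == "-" || alignment[i].2 == "-"
        · rw [if_pos hgap, ih (g + 1) (i + 1) (by omega)]
          have : pvGap alignment[i] = true := by simpa [pvGap] using hgap
          simp [this]
          constructor <;> [push_cast; skip] <;> omega
        · rw [if_neg hgap]
          have : pvGap alignment[i] = false := by simpa [pvGap] using hgap
          simp [this]
      · rw [dif_neg h, List.drop_eq_nil_of_le (by omega)]; simp

theorem pvGo_all_gap (xs : List (String × String)) (h : ∀ p ∈ xs, pvGap p) : pvGo xs = 0 := by
  induction xs with
  | nil => rfl
  | cons a t ih =>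
      have ha : pvGap a = true := h a (by simp)
      have ht : t.any (fun q => !pvGap q) = false := by
        simp only [List.any_eq_false]
        intro q hq; simp [h q (by simp [hq])]
      simp [pvGo, ha, ht]

theorem pvGo_gaps_prefix (pre xs : List (String × String))
    (hpre : ∀ p ∈ pre, pvGap p) (hx : xs.any (fun q => !pvGap q) = true) :
    pvGo (pre ++ xs) = 2 * pre.length + pvGo xs := by
  induction pre with
  | nil => simp
  | cons a t ih =>
      have ha : pvGap a = true := hpre a (by simp)
      have hany : (t ++ xs).any (fun q => !pvGap q) = true := by
        rw [List.any_append, hx]; simp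
      rw [List.cons_append]
      simp only [pvGo, ha, hany,
        ih (fun p hp => hpre p (by simp [hp]))]
      push_cast [List.length_cons]; ring

theorem pvOuterA_eq (alignment : List (String × String)) :
    ∀ (n : Nat) (i : Nat) (cost : Int), alignment.length - i ≤ n →
      pvOuterA alignment n i cost = cost + pvGo (alignment.drop i) := by
  intro n
  induction n with
  | zero =>
      intro i cost hn
      rw [pvOuterA, List.drop_eq_nil_of_le (by omega)]
      simp [pvGo]
  | succ n ih =>
      intro i cost hn
      by_cases h : i < alignment.length
      · rw [pvOuterA, dif_pos h]
        have hrun := pvGapRun_eq alignment alignment.length 0 i (by omega)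
        set t := ((alignment.drop i).takeWhile pvGap).length with ht
        have htle : t ≤ alignment.length - i := by
          have := ((alignment.drop i).takeWhile_prefix pvGap).length_le
          simp only [← ht] at this
          simpa [List.length_drop] using this
        simp only [hrun]
        by_cases hj : i + t < alignment.length
        · have hng : pvGap (alignment[i + t]) = false := by
            have h2 : t < (alignment.drop i).length := by simp [List.length_drop]; omega
            have := pvTakeWhile_getElem (alignment.drop i) pvGap (by rw [← ht]; exact h2)
            simpa [← ht, List.getElem_drop] using this
          rw [dif_pos hj]
          by_cases ht0 : t = 0
          · have hng' : pvGap (alignment[i]'h) = false := by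
              have := hng; simp only [ht0, Nat.add_zero] at this; exact this
            simp only [ht0, Nat.add_zero, Nat.cast_zero, Int.zero_add]
            rw [if_pos (by simp)]
            rw [ih (i + 1) _ (by omega)]
            rw [List.drop_eq_getElem_cons h]
            simp [pvGo, hng', pvMM]
            ring
          · rw [if_neg (by simpa using ht0)]
            rw [ih (i + t) _ (by omega)]
            have hsplit : alignment.drop i =
                (alignment.drop i).takeWhile pvGap ++ alignment.drop (i + t) := by
              conv_lhs => rw [← List.takeWhile_append_dropWhile (p := pvGap) (l := alignment.drop i)]
              rw [pvDropWhile_eq_drop, ← ht, List.drop_drop, Nat.add_comm]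
            have hany : (alignment.drop (i + t)).any (fun q => !pvGap q) = true := by
              rw [List.drop_eq_getElem_cons hj, List.any_cons]
              rw [hng]; simp
            rw [hsplit, pvGo_gaps_prefix _ _ (fun p hp => List.mem_takeWhile_imp hp) hany]
            simp only [← ht, gap_penalty]
            ring
        · rw [dif_neg hj]
          have hall : ∀ p ∈ alignment.drop i, pvGap p := by
            have hlen : t = (alignment.drop i).length := by simp [List.length_drop]; omega
            have heq : (alignment.drop i).takeWhile pvGap = alignment.drop i :=
              (List.takeWhile_prefix pvGap).eq_of_length (by rw [← ht, hlen])
            intro p hp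
            exact List.mem_takeWhile_imp (heq ▸ hp)
          rw [pvGo_all_gap _ hall]; ring
      · rw [pvOuterA, dif_neg h, List.drop_eq_nil_of_le (by omega)]
        simp [pvGo]

theorem A_eq_go (alignment : List (String × String)) :
    cost_of_alignment alignment = pvGo (alignment.dropWhile pvGap) := by
  unfold cost_of_alignment
  by_cases h0 : 0 < alignment.length
  · rw [if_pos h0, pvSkipA_eq alignment alignment.length 0 (by omega), List.drop_zero]
    rw [pvOuterA_eq alignment (alignment.length) _ 0 (by omega)]
    rw [pvDropWhile_eq_drop]
    simp
  · rw [if_neg h0]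
    rw [pvOuterA_eq alignment alignment.length 0 0 (by omega)]
    have : alignment = [] := List.length_eq_zero_iff.mp (by omega)
    simp [this, pvGo]

-- first index of a non-gap column = length of the leading gap run
theorem pvIndex_false (al : List (String × String)) (hx : ∃ p ∈ al, pvGap p = false) :
    PySem.List.index? (al.map pvGap) false = some (al.takeWhile pvGap).length := by
  induction al with
  | nil => simp at hx
  | cons a t ih =>
      by_cases ha : pvGap a
      · have hx' : ∃ p ∈ t, pvGap p = false := by
          rcases hx with ⟨p, hp, hgp⟩
          rcases List.mem_cons.mp hp with rfl | hpt
          · rw [ha] at hgp; simp at hgp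
          · exact ⟨p, hpt, hgp⟩
        rw [List.map_cons, PySem.List.index?_cons_of_ne _ (by simp [ha]), ih hx']
        simp [ha]
      · rw [List.map_cons, (by simpa using ha : pvGap a = false),
          PySem.List.index?_cons_self]
        simp [(by simpa using ha : pvGap a = false)]

theorem pvSumW (xs : List (String × String)) :
    (xs.map pvW).sum =
      2 * (xs.countP pvGap : Int) + ((xs.filter (fun p => !pvGap p)).map pvMM).sum := by
  induction xs with
  | nil => simp
  | cons a t ih =>
      by_cases ha : pvGap a <;>
        simp [pvW, ha, ih] <;> ring

theorem pvFoldlB (al : List (String × String)) (c : Int) :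
    (al.zip (al.map pvGap)).foldl
        (fun c pg => if pg.2 then c
          else c + mismatch_penalty (pvOrd pg.1.1) (pvOrd pg.1.2)) c =
      c + ((al.filter (fun p => !pvGap p)).map pvMM).sum := by
  induction al generalizing c with
  | nil => simp
  | cons a t ih =>
      by_cases ha : pvGap a <;> simp [List.zip_cons_cons, ha, ih, pvMM]
      ring

-- pvGo equals the per-column weights summed over the window with trailing gaps removed
theorem pvGo_strip (xs : List (String × String)) :
    pvGo xs = (((xs.reverse.dropWhile pvGap).reverse).map pvW).sum := by
  induction xs with
  | nil => simp [pvGo]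
  | cons a t ih =>
      by_cases hany : t.any (fun q => !pvGap q)
      · have hne : t.reverse.dropWhile pvGap ≠ [] := by
          rw [Ne, List.dropWhile_eq_nil_iff]
          rcases List.any_eq_true.mp hany with ⟨q, hqt, hq⟩
          intro hall
          have := hall q (by simpa using hqt)
          simp_all
        have hstep : (a :: t).reverse.dropWhile pvGap = t.reverse.dropWhile pvGap ++ [a] := by
          rw [List.reverse_cons, List.dropWhile_append,
            if_neg (by simpa [List.isEmpty_iff] using hne)]
        rw [hstep]
        have : pvGo (a :: t) = pvW a + pvGo t := by
          by_cases ha : pvGap a <;> simp [pvGo, pvW, ha, hany]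
        rw [this, ih]
        simp
      · have hany' : (t.any fun q => !pvGap q) = false := by simpa using hany
        have hallt : ∀ p ∈ t, pvGap p := by
          intro p hp
          simpa using List.any_eq_false.mp hany' p hp
        have htz : t.reverse.dropWhile pvGap = [] :=
          List.dropWhile_eq_nil_iff.mpr (by intro p hp; exact hallt p (by simpa using hp))
        have hgo_t : pvGo t = 0 := pvGo_all_gap t hallt
        by_cases ha : pvGap a
        · have : (a :: t).reverse.dropWhile pvGap = [] := by
            rw [List.reverse_cons, List.dropWhile_append,
              if_pos (by simp [htz]), List.dropWhile_cons, if_pos ha]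
            rfl
          rw [this]
          have hanyf : (t.any fun q => !pvGap q) = false := by simpa using hany
          simp [pvGo, ha, hanyf]
        · have : (a :: t).reverse.dropWhile pvGap = [a] := by
            rw [List.reverse_cons, List.dropWhile_append,
              if_pos (by simp [htz]), List.dropWhile_cons,
              if_neg (by simp [ha])]
          rw [this]
          simp [pvGo, pvW, ha, hgo_t]

theorem B_eq_go (alignment : List (String × String)) :
    cost_of_alignment_alt alignment = pvGo (alignment.dropWhile pvGap) := by
  unfold cost_of_alignment_alt
  have hmapgap : alignment.map (fun p => p.1 == "-" || p.2 == "-") = alignment.map pvGap := rfl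
  by_cases hall : (alignment.map pvGap).all (fun g => g)
  · rw [hmapgap, if_pos hall]
    have : alignment.dropWhile pvGap = [] := by
      rw [List.dropWhile_eq_nil_iff]
      intro p hp
      simpa using (List.all_eq_true.mp hall) (pvGap p) (List.mem_map_of_mem hp)
    rw [this]; rfl
  · rw [hmapgap, if_neg hall]
    have hx : ∃ p ∈ alignment, pvGap p = false := by
      simp only [List.all_eq_true, not_forall] at hall
      rcases hall with ⟨b, hb, hnb⟩
      rcases List.mem_map.mp hb with ⟨p, hp, rfl⟩
      exact ⟨p, hp, by simpa using hnb⟩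
    set L := (alignment.takeWhile pvGap).length with hL
    set n := alignment.length with hn
    -- leading index
    have hidx1 : PySem.List.index? (alignment.map pvGap) false = some L := pvIndex_false _ hx
    have hxr : ∃ p ∈ alignment.reverse, pvGap p = false := by
      rcases hx with ⟨p, hp, h⟩; exact ⟨p, by simpa using hp, h⟩
    set T := (alignment.reverse.takeWhile pvGap).length with hT
    have hidx2 : PySem.List.index? ((alignment.map pvGap).reverse) false = some T := by
      rw [hT, ← List.map_reverse]; exact pvIndex_false _ hxr
    have hD : alignment.dropWhile pvGap = alignment.drop L := by
      rw [pvDropWhile_eq_drop]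
    have hLlt : L < n := by
      rcases Nat.lt_or_ge L n with h | h
      · exact h
      · exfalso
        have hle : L ≤ n := (alignment.takeWhile_prefix pvGap).length_le
        have : alignment.takeWhile pvGap = alignment :=
          (alignment.takeWhile_prefix pvGap).eq_of_length (by omega)
        rcases hx with ⟨p, hp, hgp⟩
        have := List.mem_takeWhile_imp (this ▸ hp)
        simp_all
    have hhead : pvGap (alignment[L]'hLlt) = false := pvTakeWhile_getElem alignment pvGap hLlt
    have hmem : alignment[L]'hLlt ∈ alignment.dropWhile pvGap := by
      rw [hD]
      have : (alignment.drop L)[0]'(by simp [List.length_drop]; omega) = alignment[L]'hLlt := by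
        simp
      rw [← this]
      exact List.getElem_mem _
    -- the trailing gap run is computed inside the dropWhile part
    have hTtw : alignment.reverse.takeWhile pvGap =
        (alignment.dropWhile pvGap).reverse.takeWhile pvGap := by
      conv_lhs => rw [← List.takeWhile_append_dropWhile (p := pvGap) (l := alignment),
        List.reverse_append, List.takeWhile_append]
      rw [if_neg]
      intro hlen
      have := (((alignment.dropWhile pvGap).reverse).takeWhile_prefix pvGap).eq_of_length hlen
      have hgap := List.mem_takeWhile_imp (this ▸ (by simpa using hmem :
        alignment[L]'hLlt ∈ (alignment.dropWhile pvGap).reverse))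
      simp_all
    have hTlt : T < n - L := by
      have h1 : T ≤ ((alignment.dropWhile pvGap).reverse.takeWhile pvGap).length := by
        rw [hT, hTtw]
      have h2 : ((alignment.dropWhile pvGap).reverse.takeWhile pvGap).length <
          (alignment.dropWhile pvGap).length := by
        rcases Nat.lt_or_ge ((alignment.dropWhile pvGap).reverse.takeWhile pvGap).length
            ((alignment.dropWhile pvGap).reverse).length with h | h
        · simpa using h
        · exfalso
          have := (((alignment.dropWhile pvGap).reverse).takeWhile_prefix pvGap).eq_of_length
            (le_antisymm (((alignment.dropWhile pvGap).reverse).takeWhile_prefix pvGap).length_le h)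
          have hgap := List.mem_takeWhile_imp (this ▸ (by simpa using hmem :
            alignment[L]'hLlt ∈ (alignment.dropWhile pvGap).reverse))
          simp_all
      have h3 : (alignment.dropWhile pvGap).length = n - L := by
        rw [hD, List.length_drop]
      omega
    -- normalize the slice bound:  n - 1 - T + 1  =  ↑(n - T)
    have hstop : ((alignment.map pvGap).length : Int) - 1 - (T : Int) + 1 = ((n - T : Nat) : Int) := by
      rw [List.length_map, ← hn]; omega
    simp only [hidx1, hidx2, Option.getD_some]
    rw [hstop, PySem.List.slice_natCast, ← List.map_drop, ← List.map_take]
    -- the trimmed window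
    set W := ((alignment.drop L).take (n - T - L)) with hW
    have hWstrip : ((alignment.dropWhile pvGap).reverse.dropWhile pvGap).reverse = W := by
      rw [pvDropWhile_eq_drop, ← hTtw, ← hT, List.reverse_drop, List.reverse_reverse,
        List.length_reverse, hW, hD, List.length_drop, ← hn]
      congr 1
      omega
    -- count of gap columns in the window
    have hcount : ((W.map pvGap).count true : Int) = (W.countP pvGap : Int) := by
      rw [List.count_eq_countP, List.countP_map]
      congr 2
      funext p
      cases h : pvGap p <;> simp [h]
    -- non-gap columns of the window are exactly the non-gap columns of the whole list
    have hrest : ∀ p ∈ (alignment.dropWhile pvGap).drop ((alignment.dropWhile pvGap).length - T),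
        pvGap p = true := by
      intro p hp
      have hpr : p ∈ ((alignment.dropWhile pvGap).drop
          ((alignment.dropWhile pvGap).length - T)).reverse := by simpa using hp
      rw [List.reverse_drop] at hpr
      have htake : (alignment.dropWhile pvGap).reverse.take T =
          (alignment.dropWhile pvGap).reverse.takeWhile pvGap := by
        rw [hT, hTtw]
        exact (List.prefix_iff_eq_take.mp
          (((alignment.dropWhile pvGap).reverse).takeWhile_prefix pvGap)).symm
      have hlen2 : (alignment.dropWhile pvGap).length -
          ((alignment.dropWhile pvGap).length - T) = T := by
        have h3 : (alignment.dropWhile pvGap).length = n - L := by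
          rw [hD, List.length_drop]
        omega
      rw [hlen2, htake] at hpr
      exact List.mem_takeWhile_imp hpr
    have hWtake : W = (alignment.dropWhile pvGap).take ((alignment.dropWhile pvGap).length - T) := by
      rw [hW, hD, List.length_drop, ← hn]
      congr 1
      omega
    have hfil : W.filter (fun p => !pvGap p) = alignment.filter (fun p => !pvGap p) := by
      conv_rhs => rw [← List.takeWhile_append_dropWhile (p := pvGap) (l := alignment)]
      rw [List.filter_append]
      have h1 : (alignment.takeWhile pvGap).filter (fun p => !pvGap p) = [] := by
        rw [List.filter_eq_nil_iff]
        intro p hp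
        simp [List.mem_takeWhile_imp hp]
      conv_rhs => rw [← List.take_append_drop ((alignment.dropWhile pvGap).length - T)
        (alignment.dropWhile pvGap)]
      rw [List.filter_append]
      have h2 : ((alignment.dropWhile pvGap).drop ((alignment.dropWhile pvGap).length - T)).filter
          (fun p => !pvGap p) = [] := by
        rw [List.filter_eq_nil_iff]
        intro p hp
        simp [hrest p hp]
      rw [h1, h2, hWtake]
      simp
    rw [pvFoldlB alignment 0, pvGo_strip (alignment.dropWhile pvGap), hWstrip, pvSumW, hfil,
      hcount]
    ring

-- ===== VERDICT (by name: the statement is the Claim_ definition above) =====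
theorem cost_of_alignment_spec : Claim_equal_cost_of_alignment := by
  intro al _ _
  unfold Spec_cost_of_alignment
  rw [A_eq_go, B_eq_go]
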